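-- pv_equiv track=rewrite | github.com/vojay-dev/agents | astro-airflow-mcp/src/astro_airflow_mcp/discovery/astro_cli.py | _find_column_boundaries
-- ===== SOURCE A (Python) =====
-- def _find_column_boundaries(header_line: str) -> list[int]:
--     """Find column start positions by detecting 2+ space separators.
--
--     Returns:
--         List of column start positions (character indices)
--     """
--     boundaries: list[int] = []
--     # Find the start of each column (non-space after 2+ spaces, or start of line)
--     in_space_run = True  # Treat start of line as after spaces
--     space_count = 0
--
--     for i, char in enumerate(header_line):
--         if char == " ":
--             space_count += 1
--             in_space_run = True
--         else:
--             # Non-space character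
--             if in_space_run and (space_count >= 2 or i == 0 or not boundaries):
--                 boundaries.append(i)
--             in_space_run = False
--             space_count = 0
--
--     return boundaries
-- ===== SOURCE B (Python) =====
-- def _find_column_boundaries(header_line: str) -> list[int]:
--     """Find column start positions by detecting 2+ space separators.
--
--     A position i starts a column iff its character is not a space and the two
--     characters before it (with the line conceptually padded by two spaces on
--     the left) are both spaces.
--     """
--     padded = "  " + header_line
--     return [
--         i
--         for i, (c, p2, p1) in enumerate(zip(header_line, padded, padded[1:]))
--         if c != " " and p2 == " " and p1 == " "
--     ]
-- ===== Notes on version B (the rewrite author's own statement) =====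
-- stated objective: simpler
-- what changed: Replaces the stateful scan (in_space_run flag, running space counter, boundaries-empty special case) with a stateless comprehension: pad the line with two spaces on the left and keep every index whose char is non-space and whose two preceding (padded) chars are spaces.
import Mathlib
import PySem

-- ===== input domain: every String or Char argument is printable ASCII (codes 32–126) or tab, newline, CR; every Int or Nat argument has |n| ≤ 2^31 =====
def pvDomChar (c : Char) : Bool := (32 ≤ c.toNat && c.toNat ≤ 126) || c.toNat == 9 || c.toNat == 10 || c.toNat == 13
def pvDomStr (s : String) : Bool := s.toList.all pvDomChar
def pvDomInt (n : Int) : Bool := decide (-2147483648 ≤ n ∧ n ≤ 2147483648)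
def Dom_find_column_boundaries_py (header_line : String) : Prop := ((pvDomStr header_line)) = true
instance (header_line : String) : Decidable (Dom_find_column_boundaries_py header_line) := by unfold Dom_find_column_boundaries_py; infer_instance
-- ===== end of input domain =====

-- B replaces A's stateful scan by a stateless sliding-window comprehension over the
-- line padded with two spaces on the left; same O(n) cost, simpler.

-- ===== PORT A =====
-- loop body of A's for-loop: state = (boundaries, in_space_run, space_count)
def pvAStep (st : List Int × Bool × Int) (p : Int × Char) : List Int × Bool × Int :=
  if p.2 = ' ' then (st.1, true, st.2.2 + 1)
  else
    (if st.2.1 = true ∧ (2 ≤ st.2.2 ∨ p.1 = 0 ∨ st.1 = []) then st.1 ++ [p.1] else st.1,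
     false, 0)

def find_column_boundaries_py (header_line : String) : List Int :=
  ((PySem.List.enumerate header_line.toList 0).foldl pvAStep ([], true, 0)).1

-- ===== PORT B =====
-- comprehension filter of Source B: keep index i iff char ≠ ' ' and both padded predecessors are ' '
def pvBPick (p : Int × (Char × Char × Char)) : Option Int :=
  if p.2.1 ≠ ' ' ∧ p.2.2.1 = ' ' ∧ p.2.2.2 = ' ' then some p.1 else none

def find_column_boundaries_py_alt (header_line : String) : List Int :=
  let padded := ' ' :: ' ' :: header_line.toList          -- "  " + header_line
  -- zip(header_line, padded, padded[1:]); padded[1:] = padded.tail (padded is nonempty)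
  (PySem.List.enumerate (header_line.toList.zip (padded.zip padded.tail)) 0).filterMap pvBPick

-- ===== PRECONDITION & SPEC =====
def Spec_find_column_boundaries_py (header_line : String) (out : List Int) : Prop := out = find_column_boundaries_py_alt header_line
instance (header_line : String) (out : List Int) : Decidable (Spec_find_column_boundaries_py header_line out) := by unfold Spec_find_column_boundaries_py; infer_instance

-- ===== CLAIM (what is proved, stated in full; the proofs are below) =====
def Claim_equal_find_column_boundaries_py : Prop := ∀ (header_line : String), Dom_find_column_boundaries_py header_line → Spec_find_column_boundaries_py header_line (find_column_boundaries_py header_line)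

-- ===== LEMMAS AND PROOFS =====

-- Invariant-carrying equivalence of A's fold with B's filterMap, generalized over the
-- loop state (bs, inR, cnt) and the two characters p2 p1 preceding the suffix cs
-- (virtually ' ' at the start of the line).
lemma pv_loop_eq (cs : List Char) : ∀ (i cnt : Int) (bs : List Int) (inR : Bool) (p2 p1 : Char),
    0 ≤ i → 0 ≤ cnt →
    (p1 = ' ' ↔ inR = true) →
    (2 ≤ cnt → p2 = ' ') →
    (1 ≤ cnt → p1 = ' ') →
    (inR = true → 1 ≤ cnt ∨ bs = []) →
    (bs = [] → inR = true) →
    (bs = [] → p2 = ' ') →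
    (i = 0 → p2 = ' ') →
    (p2 = ' ' ∧ p1 = ' ' → 2 ≤ cnt ∨ bs = []) →
    ((PySem.List.enumerate cs i).foldl pvAStep (bs, inR, cnt)).1
      = bs ++ (PySem.List.enumerate (cs.zip ((p2 :: p1 :: cs).zip (p1 :: cs))) i).filterMap pvBPick := by
  induction cs with
  | nil => intro i cnt bs inR p2 p1 _ _ _ _ _ _ _ _ _ _; simp [PySem.List.enumerate_nil]
  | cons c rest ih =>
    intro i cnt bs inR p2 p1 hi hcnt h1 h2 h5 h6 h7 h4 h0 h3
    simp only [List.zip_cons_cons, PySem.List.enumerate_cons, List.foldl_cons, List.filterMap_cons]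
    by_cases hc : c = ' '
    · -- space character
      have hA : pvAStep (bs, inR, cnt) (i, c) = (bs, true, cnt + 1) := by
        simp [pvAStep, hc]
      have hB : pvBPick (i, c, p2, p1) = none := by simp [pvBPick, hc]
      rw [hA, hB]
      subst hc
      rw [ih (i + 1) (cnt + 1) bs true p1 ' ' (by omega) (by omega)
        (by simp)
        (fun h => h5 (by omega))
        (fun _ => rfl)
        (fun _ => Or.inl (by omega))
        (fun _ => rfl)
        (fun hb => h1.mpr (h7 hb))
        (fun h => absurd h (by omega))
        (fun ⟨hp1, _⟩ => (h6 (h1.mp hp1)).imp (fun h => by omega) id)]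
      simp
    · -- non-space character: the two append conditions coincide
      have hcond : (inR = true ∧ (2 ≤ cnt ∨ i = 0 ∨ bs = [])) ↔ (p2 = ' ' ∧ p1 = ' ') := by
        constructor
        · rintro ⟨hr, h | h | h⟩
          · exact ⟨h2 h, h1.mpr hr⟩
          · exact ⟨h0 h, h1.mpr hr⟩
          · exact ⟨h4 h, h1.mpr hr⟩
        · rintro ⟨hp2, hp1⟩
          exact ⟨h1.mp hp1, (h3 ⟨hp2, hp1⟩).imp id (fun h => Or.inr h)⟩
      by_cases hk : p2 = ' ' ∧ p1 = ' '
      · have hA : pvAStep (bs, inR, cnt) (i, c) = (bs ++ [i], false, 0) := by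
          simp only [pvAStep]
          rw [if_neg hc, if_pos (hcond.mpr hk)]
        have hB : pvBPick (i, c, p2, p1) = some i := by simp [pvBPick, hc, hk.1, hk.2]
        rw [hA, hB]
        rw [ih (i + 1) 0 (bs ++ [i]) false p1 c (by omega) le_rfl
          (by simp [hc])
          (fun h => absurd h (by omega))
          (fun h => absurd h (by omega))
          (fun h => by simp at h)
          (fun hb => by simp at hb)
          (fun hb => by simp at hb)
          (fun h => absurd h (by omega))
          (fun ⟨_, hp1⟩ => absurd hp1 hc)]
        simp
      · have hA : pvAStep (bs, inR, cnt) (i, c) = (bs, false, 0) := by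
          simp only [pvAStep]
          rw [if_neg hc, if_neg (fun h => hk (hcond.mp h))]
        have hB : pvBPick (i, c, p2, p1) = none := by
          simp only [pvBPick]
          rw [if_neg]
          rintro ⟨_, hp2, hp1⟩
          exact hk ⟨hp2, hp1⟩
        have hbs : bs ≠ [] := by
          intro hb
          exact hk (hcond.mp ⟨h7 hb, Or.inr (Or.inr hb)⟩)
        rw [hA, hB]
        rw [ih (i + 1) 0 bs false p1 c (by omega) le_rfl
          (by simp [hc])
          (fun h => absurd h (by omega))
          (fun h => absurd h (by omega))
          (fun h => by simp at h)
          (fun hb => absurd hb hbs)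
          (fun hb => absurd hb hbs)
          (fun h => absurd h (by omega))
          (fun ⟨_, hp1⟩ => absurd hp1 hc)]
        simp

-- ===== VERDICT (by name: the statement is the Claim_ definition above) =====
theorem find_column_boundaries_py_spec : Claim_equal_find_column_boundaries_py := by
  intro s _
  show _ = _
  simp only [find_column_boundaries_py, find_column_boundaries_py_alt, List.tail_cons]
  rw [pv_loop_eq s.toList 0 0 [] true ' ' ' ' le_rfl le_rfl
    (by simp) (fun h => rfl) (fun _ => rfl) (fun _ => Or.inr rfl)
    (fun _ => rfl) (fun _ => rfl) (fun _ => rfl) (fun _ => Or.inr rfl)]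
  simp
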